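-- pv_equiv track=rewrite | github.com/1hookie/practice2 | dependency_graph.py | _bfs_reverse_dependencies
-- ===== SOURCE A (Python) =====
-- from collections import deque
--
-- def _bfs_reverse_dependencies(target_package: str, reverse_graph: dict, max_depth: int):
--     """BFS для поиска обратных зависимостей"""
--     visited = set()
--     result = set()
--     queue = deque([(target_package, 0)])
--
--     while queue:
--         current_package, depth = queue.popleft()
--
--         if depth >= max_depth:
--             continue
--
--         if current_package in reverse_graph:
--             for dependent_package in reverse_graph[current_package]:
--                 if dependent_package not in visited:
--                     visited.add(dependent_package)
--                     result.add(dependent_package)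
--                     queue.append((dependent_package, depth + 1))
--
--     return sorted(list(result))
-- ===== SOURCE B (Python) =====
-- def _bfs_reverse_dependencies(target_package: str, reverse_graph: dict, max_depth: int):
--     """Level-synchronous BFS over reverse dependencies."""
--     visited = set()
--     result = set()
--     frontier = {target_package}
--     depth = 0
--     while frontier and depth < max_depth:
--         next_frontier = set()
--         for node in frontier:
--             for dep in reverse_graph.get(node, []):
--                 if dep not in visited:
--                     visited.add(dep)
--                     result.add(dep)
--                     next_frontier.add(dep)
--         frontier = next_frontier
--         depth += 1
--     return sorted(result)
-- ===== Notes on version B (the rewrite author's own statement) =====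
-- stated objective: idiomatic
-- what changed: Replaces the deque of (package, depth) pairs by a level-synchronous BFS that expands one whole frontier set per iteration, so no per-node depth counters are carried.
import Mathlib
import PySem

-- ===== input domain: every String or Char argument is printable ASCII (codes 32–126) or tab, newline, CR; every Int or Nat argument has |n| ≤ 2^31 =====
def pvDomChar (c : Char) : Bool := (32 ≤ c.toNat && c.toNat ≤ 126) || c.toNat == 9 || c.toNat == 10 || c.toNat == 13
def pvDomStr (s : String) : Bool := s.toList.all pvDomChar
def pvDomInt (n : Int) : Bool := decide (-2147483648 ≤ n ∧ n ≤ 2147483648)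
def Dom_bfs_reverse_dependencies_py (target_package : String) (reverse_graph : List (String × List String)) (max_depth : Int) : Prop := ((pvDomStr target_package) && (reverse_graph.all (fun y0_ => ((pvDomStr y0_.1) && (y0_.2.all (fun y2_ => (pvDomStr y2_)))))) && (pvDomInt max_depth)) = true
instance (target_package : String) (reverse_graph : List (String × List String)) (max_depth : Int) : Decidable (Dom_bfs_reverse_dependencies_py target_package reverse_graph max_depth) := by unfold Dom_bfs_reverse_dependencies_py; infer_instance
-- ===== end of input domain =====

-- B replaces A's deque of (package, depth) pairs by a level-synchronous BFS over frontier sets (idiomatic; same cost).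

-- ===== PORT A =====
-- A's inner 'for dependent_package in reverse_graph[current_package]' loop:
-- state (visited, result, queue); new dependents are enqueued at depth d+1.
def pvInnerA (d : Int) (visited result : PySem.Set String) (queue : List (String × Int)) :
    List String → PySem.Set String × PySem.Set String × List (String × Int)
  | [] => (visited, result, queue)
  | dep :: deps =>
    if PySem.Set.contains visited dep then pvInnerA d visited result queue deps
    else pvInnerA d (PySem.Set.add visited dep) (PySem.Set.add result dep)
      (queue ++ [(dep, d + 1)]) deps

-- termination measure for A's while-loop: queue length plus twice the number of
-- graph-value names not yet visited
def pvUnvis (g : List (String × List String)) (v : PySem.Set String) : Nat :=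
  ((PySem.List.dedup (g.flatMap (fun e => e.2))).filter
    (fun s => !(PySem.Set.contains v s))).length

theorem pvFilterSwap :
    ∀ (C : List String), C.Nodup → ∀ (a : String), a ∈ C → ∀ (q q' : String → Bool),
    q a = true → q' a = false → (∀ s, s ≠ a → q' s = q s) →
    (C.filter q').length + 1 = (C.filter q).length := by
  intro C
  induction C with
  | nil => intro _ a ha; cases ha
  | cons x C ih =>
    intro hnd a ha q q' hq hq' hne
    rcases List.nodup_cons.mp hnd with ⟨hx, hnd'⟩
    rcases List.mem_cons.mp ha with rfl | ha'
    · have hfc : C.filter q' = C.filter q :=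
        List.filter_congr (fun s hs => hne s (fun h => hx (h ▸ hs)))
      simp [hq, hq', hfc]
    · have hxa : x ≠ a := fun h => hx (h ▸ ha')
      rw [List.filter_cons, List.filter_cons, hne x hxa]
      by_cases hqx : q x = true
      · simp only [hqx, if_true, List.length_cons]
        rw [← ih hnd' a ha' q q' hq hq' hne]
      · simp only [Bool.not_eq_true] at hqx
        simp only [hqx, Bool.false_eq_true, if_false]
        exact ih hnd' a ha' q q' hq hq' hne

theorem pvFilterLen {C : List String} (hnd : C.Nodup) {a : String} (ha : a ∈ C)
    (v : PySem.Set String) (hv : a ∉ v) :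
    (C.filter (fun s => !(PySem.Set.contains (PySem.Set.add v a) s))).length + 1
      = (C.filter (fun s => !(PySem.Set.contains v s))).length := by
  have hadd : PySem.Set.add v a = v ++ [a] := by
    simp [PySem.Set.add, PySem.Set.contains, hv]
  refine pvFilterSwap C hnd a ha _ _ ?_ ?_ ?_
  · simp [PySem.Set.contains, hv]
  · rw [hadd]
    simp [PySem.Set.contains]
  · intro s hs
    rw [hadd]
    simp [PySem.Set.contains, hs]

theorem pvUnvis_add (g : List (String × List String)) {v : PySem.Set String} {a : String}
    (ha : a ∈ PySem.List.dedup (g.flatMap (fun e => e.2))) (hv : a ∉ v) :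
    pvUnvis g (PySem.Set.add v a) + 1 = pvUnvis g v :=
  pvFilterLen (PySem.List.nodup_dedup _) ha v hv

theorem pvInnerA_measure (g : List (String × List String)) (d : Int) :
    ∀ (deps : List String) (visited result : PySem.Set String) (queue : List (String × Int)),
    (∀ dep ∈ deps, dep ∈ PySem.List.dedup (g.flatMap (fun e => e.2))) →
    (pvInnerA d visited result queue deps).2.2.length
        + 2 * pvUnvis g (pvInnerA d visited result queue deps).1
      ≤ queue.length + 2 * pvUnvis g visited := by
  intro deps
  induction deps with
  | nil => intro v r q _; simp [pvInnerA]
  | cons dep deps ih =>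
    intro v r q hsub
    by_cases hc : dep ∈ v
    · have hb : PySem.Set.contains v dep = true := by simp [hc]
      simp only [pvInnerA, hb, if_true]
      exact ih v r q (fun x hx => hsub x (List.mem_cons_of_mem _ hx))
    · have hb : PySem.Set.contains v dep = false := by simp [hc]
      have hdec := pvUnvis_add g (hsub dep List.mem_cons_self) hc
      have hih := ih (PySem.Set.add v dep) (PySem.Set.add r dep) (q ++ [(dep, d + 1)])
        (fun x hx => hsub x (List.mem_cons_of_mem _ hx))
      simp only [pvInnerA, hb, Bool.false_eq_true, if_false]
      simp only [List.length_append, List.length_cons, List.length_nil] at hih ⊢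
      omega

theorem pvDepsSub (g : List (String × List String)) (p : String) (deps : List String)
    (h : PySem.Dict.get? ⟨g⟩ p = some deps) :
    ∀ dep ∈ deps, dep ∈ PySem.List.dedup (g.flatMap (fun e => e.2)) := by
  intro dep hdep
  simp only [PySem.Dict.get?, Option.map_eq_some_iff] at h
  obtain ⟨⟨p', deps'⟩, hfind, hEq⟩ := h
  have hmem : (p', deps') ∈ g := List.mem_of_find?_eq_some hfind
  have hdep' : dep ∈ deps' := by simp only [← hEq] at hdep; exact hdep
  rw [PySem.List.dedup, PySem.Set.mem_ofList]
  exact List.mem_flatMap.mpr ⟨(p', deps'), hmem, hdep'⟩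

-- A's while-loop over the deque of (package, depth) pairs
def pvLoopA (g : List (String × List String)) (md : Int)
    (visited result : PySem.Set String) (queue : List (String × Int)) : List String :=
  match queue with
  | [] => PySem.List.sorted result (fun x => x)
  | (p, d) :: rest =>
    if md ≤ d then pvLoopA g md visited result rest
    else
      match h : PySem.Dict.get? ⟨g⟩ p with
      | none => pvLoopA g md visited result rest
      | some deps =>
        pvLoopA g md (pvInnerA d visited result rest deps).1
          (pvInnerA d visited result rest deps).2.1
          (pvInnerA d visited result rest deps).2.2
termination_by queue.length + 2 * pvUnvis g visited
decreasing_by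
  · simp
  · simp
  · have := pvInnerA_measure g d deps visited result rest (pvDepsSub g p deps h)
    simp only [List.length_cons]
    omega

def bfs_reverse_dependencies_py (target_package : String)
    (reverse_graph : List (String × List String)) (max_depth : Int) : List String :=
  pvLoopA reverse_graph max_depth PySem.Set.empty PySem.Set.empty [(target_package, 0)]

-- ===== PORT B =====
-- B's inner loop over reverse_graph.get(node, []): also collects the next frontier
def pvScanB (visited result nf : PySem.Set String) :
    List String → PySem.Set String × PySem.Set String × PySem.Set String
  | [] => (visited, result, nf)
  | dep :: deps =>
    if PySem.Set.contains visited dep then pvScanB visited result nf deps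
    else pvScanB (PySem.Set.add visited dep) (PySem.Set.add result dep)
      (PySem.Set.add nf dep) deps

-- B's 'for node in frontier' loop: expand one whole level
def pvLevelB (g : List (String × List String)) (visited result nf : PySem.Set String) :
    List String → PySem.Set String × PySem.Set String × PySem.Set String
  | [] => (visited, result, nf)
  | node :: fr =>
    pvLevelB g (pvScanB visited result nf (PySem.Dict.getD ⟨g⟩ node [])).1
      (pvScanB visited result nf (PySem.Dict.getD ⟨g⟩ node [])).2.1
      (pvScanB visited result nf (PySem.Dict.getD ⟨g⟩ node [])).2.2 fr

-- B's 'while frontier and depth < max_depth' loop; remaining = max_depth - depth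
def pvLoopB (g : List (String × List String)) (visited result frontier : PySem.Set String) :
    Nat → List String
  | 0 => PySem.List.sorted result (fun x => x)
  | n + 1 =>
    if frontier = [] then PySem.List.sorted result (fun x => x)
    else
      pvLoopB g (pvLevelB g visited result PySem.Set.empty frontier).1
        (pvLevelB g visited result PySem.Set.empty frontier).2.1
        (pvLevelB g visited result PySem.Set.empty frontier).2.2 n

def bfs_reverse_dependencies_py_alt (target_package : String)
    (reverse_graph : List (String × List String)) (max_depth : Int) : List String :=
  pvLoopB reverse_graph PySem.Set.empty PySem.Set.empty
    (PySem.Set.ofList [target_package]) max_depth.toNat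

-- ===== PRECONDITION & SPEC =====
def Spec_bfs_reverse_dependencies_py (target_package : String) (reverse_graph : List (String × List String)) (max_depth : Int) (out : List String) : Prop := out = bfs_reverse_dependencies_py_alt target_package reverse_graph max_depth
instance (target_package : String) (reverse_graph : List (String × List String)) (max_depth : Int) (out : List String) : Decidable (Spec_bfs_reverse_dependencies_py target_package reverse_graph max_depth out) := by unfold Spec_bfs_reverse_dependencies_py; infer_instance

-- ===== CLAIM (what is proved, stated in full; the proofs are below) =====
def Claim_equal_bfs_reverse_dependencies_py : Prop := ∀ (target_package : String) (reverse_graph : List (String × List String)) (max_depth : Int), Dom_bfs_reverse_dependencies_py target_package reverse_graph max_depth → Spec_bfs_reverse_dependencies_py target_package reverse_graph max_depth (bfs_reverse_dependencies_py target_package reverse_graph max_depth)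

-- ===== LEMMAS AND PROOFS =====

-- everything in the accumulated next-frontier stays visited
theorem pvScanB_sub :
    ∀ (deps : List String) (v r nf : PySem.Set String),
    (∀ x ∈ nf, x ∈ v) →
    ∀ x ∈ (pvScanB v r nf deps).2.2, x ∈ (pvScanB v r nf deps).1 := by
  intro deps
  induction deps with
  | nil => intro v r nf h; simpa [pvScanB] using h
  | cons dep deps ih =>
    intro v r nf h
    by_cases hc : dep ∈ v
    · have hb : PySem.Set.contains v dep = true := by simp [hc]
      simp only [pvScanB, hb, if_true]
      exact ih v r nf h
    · have hb : PySem.Set.contains v dep = false := by simp [hc]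
      simp only [pvScanB, hb, Bool.false_eq_true, if_false]
      apply ih
      intro x hx
      rcases (PySem.Set.mem_add nf dep x).mp hx with hx' | heq
      · exact (PySem.Set.mem_add v dep x).mpr (Or.inl (h x hx'))
      · exact (PySem.Set.mem_add v dep x).mpr (Or.inr heq)

-- A's inner loop, run on a queue whose tail is the next level, is B's scan
theorem pvInner_eq_scan (d : Int) :
    ∀ (deps : List String) (v r nf : PySem.Set String) (q0 : List (String × Int)),
    (∀ x ∈ nf, x ∈ v) →
    pvInnerA d v r (q0 ++ nf.map (fun s => (s, d + 1))) deps
      = ((pvScanB v r nf deps).1, (pvScanB v r nf deps).2.1,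
         q0 ++ ((pvScanB v r nf deps).2.2).map (fun s => (s, d + 1))) := by
  intro deps
  induction deps with
  | nil => intro v r nf q0 h; simp [pvInnerA, pvScanB]
  | cons dep deps ih =>
    intro v r nf q0 h
    by_cases hc : dep ∈ v
    · have hb : PySem.Set.contains v dep = true := by simp [hc]
      simp only [pvInnerA, pvScanB, hb, if_true]
      exact ih v r nf q0 h
    · have hb : PySem.Set.contains v dep = false := by simp [hc]
      have hdn : dep ∉ nf := fun hmem => hc (h dep hmem)
      have hadd : PySem.Set.add nf dep = nf ++ [dep] := by
        simp [PySem.Set.add, PySem.Set.contains, hdn]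
      have hsub : ∀ x ∈ PySem.Set.add nf dep, x ∈ PySem.Set.add v dep := by
        intro x hx
        rcases (PySem.Set.mem_add nf dep x).mp hx with hx' | heq
        · exact (PySem.Set.mem_add v dep x).mpr (Or.inl (h x hx'))
        · exact (PySem.Set.mem_add v dep x).mpr (Or.inr heq)
      simp only [pvInnerA, pvScanB, hb, Bool.false_eq_true, if_false]
      have heq : (q0 ++ nf.map (fun s => (s, d + 1))) ++ [(dep, d + 1)]
          = q0 ++ (PySem.Set.add nf dep).map (fun s => (s, d + 1)) := by
        rw [hadd]; simp
      rw [heq]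
      exact ih (PySem.Set.add v dep) (PySem.Set.add r dep) (PySem.Set.add nf dep) q0 hsub

-- A processes one whole depth level exactly as B's pvLevelB does
theorem pvLoopA_level (g : List (String × List String)) (md : Int) (d : Int) (hd : ¬ md ≤ d) :
    ∀ (cur : List String) (v r nf : PySem.Set String),
    (∀ x ∈ nf, x ∈ v) →
    pvLoopA g md v r (cur.map (fun s => (s, d)) ++ nf.map (fun s => (s, d + 1)))
      = pvLoopA g md (pvLevelB g v r nf cur).1 (pvLevelB g v r nf cur).2.1
          (((pvLevelB g v r nf cur).2.2).map (fun s => (s, d + 1))) := by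
  intro cur
  induction cur with
  | nil => intro v r nf h; simp [pvLevelB]
  | cons p cur ih =>
    intro v r nf h
    rw [List.map_cons, List.cons_append, pvLoopA]
    simp only [hd, if_false]
    split
    · next hg =>
      have hget : PySem.Dict.getD ⟨g⟩ p [] = [] := by
        simp [PySem.Dict.getD, hg]
      simp only [pvLevelB, hget, pvScanB]
      exact ih v r nf h
    · next deps hg =>
      have hget : PySem.Dict.getD ⟨g⟩ p [] = deps := by
        simp [PySem.Dict.getD, hg]
      rw [pvInner_eq_scan d deps v r nf (cur.map (fun s => (s, d))) h]
      simp only [pvLevelB, hget]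
      exact ih (pvScanB v r nf deps).1 (pvScanB v r nf deps).2.1 (pvScanB v r nf deps).2.2
        (pvScanB_sub deps v r nf h)

-- once the depth bound is reached, A only drains the queue
theorem pvLoopA_drop (g : List (String × List String)) (md : Int) (d : Int) (hd : md ≤ d) :
    ∀ (f : List String) (v r : PySem.Set String),
    pvLoopA g md v r (f.map (fun s => (s, d))) = PySem.List.sorted r (fun x => x) := by
  intro f
  induction f with
  | nil => intro v r; rw [List.map_nil, pvLoopA]
  | cons p f ih =>
    intro v r
    rw [List.map_cons, pvLoopA]
    simp only [hd, if_true]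
    exact ih v r

-- the main simulation: A at depth d with the whole frontier queued equals B with
-- remaining = (md - d).toNat levels to go
theorem pvLoopAB (g : List (String × List String)) (md : Int) :
    ∀ (n : Nat) (d : Int) (v r : PySem.Set String) (f : List String),
    (md - d).toNat = n →
    pvLoopA g md v r (f.map (fun s => (s, d))) = pvLoopB g v r f n := by
  intro n
  induction n with
  | zero =>
    intro d v r f hn
    have hd : md ≤ d := by omega
    rw [pvLoopB, pvLoopA_drop g md d hd]
  | succ n ih =>
    intro d v r f hn
    have hd : ¬ md ≤ d := by omega
    rw [pvLoopB]
    by_cases hf : f = []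
    · subst hf
      simp only [if_true, List.map_nil]
      rw [pvLoopA]
    · simp only [hf, if_false]
      have h0 : (f.map (fun s => (s, d))) = f.map (fun s => (s, d)) ++
          (PySem.Set.empty : PySem.Set String).map (fun s => (s, d + 1)) := by
        simp [PySem.Set.empty]
      rw [h0, pvLoopA_level g md d hd f v r PySem.Set.empty (by intro x hx; cases hx)]
      exact ih (d + 1) _ _ _ (by omega)

-- ===== VERDICT (by name: the statement is the Claim_ definition above) =====
theorem bfs_reverse_dependencies_py_spec : Claim_equal_bfs_reverse_dependencies_py := by
  intro t g md _
  unfold Spec_bfs_reverse_dependencies_py bfs_reverse_dependencies_py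
    bfs_reverse_dependencies_py_alt
  have hstart : [(t, (0 : Int))] = [t].map (fun s => (s, (0 : Int))) := rfl
  have hfront : (PySem.Set.ofList [t] : PySem.Set String) = [t] := rfl
  rw [hstart, hfront, pvLoopAB g md md.toNat 0 PySem.Set.empty PySem.Set.empty [t] (by omega)]
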